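-- pv_equiv track=rewrite | github.com/hmzbn/qemlib | qemlib/dd/insertion.py | _compute_slack
-- ===== SOURCE A (Python) =====
-- def _compute_slack(mask):
--     """
--     Compute slack windows per qubit.
--     """
--     n = len(mask)
--     d = len(mask[0])
--
--     slack = [[0] * d for _ in range(n)]
--
--     for q in range(n):
--         c = 0
--         while c < d:
--             if mask[q][c] == 0:
--                 length = 0
--                 start = c
--
--                 while c < d and mask[q][c] == 0:
--                     length += 1
--                     c += 1
--
--                 slack[q][start] = length
--             else:
--                 c += 1
--
--     return slack
-- ===== SOURCE B (Python) =====
-- def _compute_slack(mask):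
--     # Right-to-left single pass per row: keep a running zero counter and
--     # write it only at a zero block's left edge.
--     d = len(mask[0])
--     slack = []
--     for row in mask:
--         out = [0] * d
--         run = 0
--         for c in range(d - 1, -1, -1):
--             if row[c] == 0:
--                 run += 1
--                 if c == 0 or row[c - 1] != 0:
--                     out[c] = run
--                     run = 0
--             else:
--                 run = 0
--         slack.append(out)
--     return slack
-- ===== Notes on version B (the rewrite author's own statement) =====
-- stated objective: simpler
-- what changed: Replaces A's forward two-pointer scan with a nested run-counting while loop by a single right-to-left pass per row that keeps a running zero counter and writes it only at a zero block's left edge.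
import Mathlib
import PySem

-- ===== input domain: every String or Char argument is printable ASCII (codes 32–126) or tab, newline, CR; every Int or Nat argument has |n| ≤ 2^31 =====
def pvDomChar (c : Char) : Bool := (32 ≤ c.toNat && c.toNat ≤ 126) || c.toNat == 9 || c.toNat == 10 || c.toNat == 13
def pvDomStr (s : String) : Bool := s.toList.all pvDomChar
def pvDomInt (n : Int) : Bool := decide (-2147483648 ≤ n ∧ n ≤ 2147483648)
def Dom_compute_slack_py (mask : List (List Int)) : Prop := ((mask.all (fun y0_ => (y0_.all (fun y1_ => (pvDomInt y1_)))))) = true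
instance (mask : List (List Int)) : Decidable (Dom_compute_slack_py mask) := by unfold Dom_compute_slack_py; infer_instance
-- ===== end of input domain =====

-- B replaces A's forward two-pointer nested-while run finder by a single
-- right-to-left pass per row with a running zero counter (objective: simpler).

-- ===== PORT A =====
-- the inner `while c < d and mask[q][c] == 0` counting loop of A
def aZeroRun (row : List Int) (d c : Nat) : Nat :=
  if _h : c < d ∧ row.getD c 0 = 0 then aZeroRun row d (c+1) + 1 else 0
termination_by d - c
decreasing_by omega

theorem aZeroRun_pos (row : List Int) (d c : Nat) (h1 : c < d) (h2 : row.getD c 0 = 0) :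
    1 ≤ aZeroRun row d c := by
  rw [aZeroRun, dif_pos ⟨h1, h2⟩]; omega

-- the outer `while c < d` loop of A over one row
def aOuterRow (row : List Int) (d c : Nat) (s : List Int) : List Int :=
  if _h : c < d then
    if row.getD c 0 = 0 then
      let len := aZeroRun row d c
      aOuterRow row d (c + len) (s.set c (len : Int))
    else aOuterRow row d (c+1) s
  else s
termination_by d - c
decreasing_by
  · have := aZeroRun_pos row d c ‹c < d› ‹row.getD c 0 = 0›; omega
  · omega

def compute_slack_py (mask : List (List Int)) : List (List Int) :=
  let _n := mask.length
  let d := (mask.headD []).length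
  mask.map (fun row => aOuterRow row d 0 (List.replicate d (0 : Int)))

-- ===== PORT B =====
-- B's inner loop: c counts down; index `c` of the pattern `c+1` is processed
def bLoop (row : List Int) : Nat → Nat → List Int → List Int
  | 0, _, out => out
  | c+1, run, out =>
    if row.getD c 0 = 0 then
      if c = 0 ∨ ¬ row.getD (c-1) 0 = 0 then
        bLoop row c 0 (out.set c ((run + 1 : Nat) : Int))
      else bLoop row c (run + 1) out
    else bLoop row c 0 out

def compute_slack_py_alt (mask : List (List Int)) : List (List Int) :=
  let d := (mask.headD []).length
  mask.map (fun row => bLoop row d 0 (List.replicate d (0 : Int)))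

-- ===== PRECONDITION & SPEC =====
-- Pre_ excludes exactly the inputs where Python A raises IndexError:
-- the empty mask (mask[0]) and masks with a row shorter than the first row.
def Pre_compute_slack_py (mask : List (List Int)) : Prop :=
  mask ≠ [] ∧ ∀ row ∈ mask, (mask.headD []).length ≤ row.length
instance (mask : List (List Int)) : Decidable (Pre_compute_slack_py mask) := by
  unfold Pre_compute_slack_py; infer_instance
def pvWitness_compute_slack_py : List (List Int) := [[0, 1, 0], [0, 0, 0]]

def Spec_compute_slack_py (mask : List (List Int)) (out : List (List Int)) : Prop := out = compute_slack_py_alt mask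
instance (mask : List (List Int)) (out : List (List Int)) : Decidable (Spec_compute_slack_py mask out) := by unfold Spec_compute_slack_py; infer_instance

-- ===== CLAIM (what is proved, stated in full; the proofs are below) =====
def Claim_equal_compute_slack_py : Prop := ∀ (mask : List (List Int)), Dom_compute_slack_py mask → Pre_compute_slack_py mask → Spec_compute_slack_py mask (compute_slack_py mask)

-- ===== LEMMAS AND PROOFS =====

theorem aZeroRun_le (row : List Int) (d c : Nat) : aZeroRun row d c ≤ d - c := by
  induction c using aZeroRun.induct (row := row) (d := d) with
  | case1 c h ih => rw [aZeroRun, dif_pos h]; omega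
  | case2 c h => rw [aZeroRun, dif_neg h]; omega

theorem aZeroRun_zero_mem (row : List Int) (d : Nat) :
    ∀ c j, c ≤ j → j < c + aZeroRun row d c → row.getD j 0 = 0 := by
  intro c
  induction c using aZeroRun.induct (row := row) (d := d) with
  | case1 c h ih =>
    intro j hj1 hj2
    rw [aZeroRun, dif_pos h] at hj2
    rcases Nat.eq_or_lt_of_le hj1 with heq | hlt
    · exact heq ▸ h.2
    · exact ih j hlt (by omega)
  | case2 c h =>
    intro j hj1 hj2
    rw [aZeroRun, dif_neg h] at hj2; omega

theorem aZeroRun_stop (row : List Int) (d : Nat) :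
    ∀ c, c + aZeroRun row d c < d → ¬ row.getD (c + aZeroRun row d c) 0 = 0 := by
  intro c
  induction c using aZeroRun.induct (row := row) (d := d) with
  | case1 c h ih =>
    rw [aZeroRun, dif_pos h]
    intro hlt
    have : c + (aZeroRun row d (c+1) + 1) = (c+1) + aZeroRun row d (c+1) := by omega
    rw [this] at hlt ⊢
    exact ih hlt
  | case2 c h =>
    rw [aZeroRun, dif_neg h]
    intro hlt
    simp only [Nat.add_zero] at hlt ⊢
    exact fun h0 => h ⟨hlt, h0⟩

theorem aZeroRun_succ (row : List Int) (d c : Nat) (h1 : c < d) (h2 : row.getD c 0 = 0) :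
    aZeroRun row d c = aZeroRun row d (c+1) + 1 := by
  conv_lhs => rw [aZeroRun]
  rw [dif_pos ⟨h1, h2⟩]

theorem aZeroRun_zero (row : List Int) (d c : Nat) (h : ¬ c < d ∨ ¬ row.getD c 0 = 0) :
    aZeroRun row d c = 0 := by
  rw [aZeroRun, dif_neg (by tauto)]


theorem pv_getD_set_ne (l : List Int) (i j : Nat) (v : Int) (h : i ≠ j) :
    (l.set i v).getD j 0 = l.getD j 0 := by
  simp [List.getD, List.getElem?_set_ne h]

theorem pv_getD_set_self (l : List Int) (i : Nat) (v : Int) (h : i < l.length) :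
    (l.set i v).getD i 0 = v := by
  simp [List.getD, h]

theorem pv_getD_replicate (d i : Nat) : (List.replicate d (0 : Int)).getD i 0 = 0 := by
  simp [List.getD, List.getElem?_replicate]; split <;> simp

theorem aOuter_char (row : List Int) (d : Nat) :
    ∀ fuel c s, d - c ≤ fuel → s.length = d →
    (c = 0 ∨ ¬ row.getD (c-1) 0 = 0 ∨ ¬ row.getD c 0 = 0 ∨ d ≤ c) →
    (∀ i, c ≤ i → i < d → s.getD i 0 = 0) →
    (aOuterRow row d c s).length = d ∧
    (∀ i, i < c → (aOuterRow row d c s).getD i 0 = s.getD i 0) ∧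
    (∀ i, c ≤ i → i < d → (aOuterRow row d c s).getD i 0 =
      (if row.getD i 0 = 0 ∧ (i = 0 ∨ ¬ row.getD (i-1) 0 = 0) then ((aZeroRun row d i : Nat) : Int) else 0)) := by
  intro fuel
  induction fuel with
  | zero =>
    intro c s hf hs _ _
    rw [aOuterRow, dif_neg (by omega)]
    exact ⟨hs, fun i _ => rfl, fun i h1 h2 => by omega⟩
  | succ fuel ih =>
    intro c s hf hs H Hz
    by_cases hc : c < d
    · by_cases h0 : row.getD c 0 = 0
      · have hedge : c = 0 ∨ ¬ row.getD (c-1) 0 = 0 := by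
          rcases H with h | h | h | h
          · exact Or.inl h
          · exact Or.inr h
          · exact absurd h0 h
          · omega
        rw [aOuterRow, dif_pos hc, if_pos h0]
        have hpos : 1 ≤ aZeroRun row d c := aZeroRun_pos row d c hc h0
        have hle : aZeroRun row d c ≤ d - c := aZeroRun_le row d c
        have H' : c + aZeroRun row d c = 0 ∨ ¬ row.getD (c + aZeroRun row d c - 1) 0 = 0 ∨
            ¬ row.getD (c + aZeroRun row d c) 0 = 0 ∨ d ≤ c + aZeroRun row d c := by
          by_cases hstop : c + aZeroRun row d c < d
          · exact Or.inr (Or.inr (Or.inl (aZeroRun_stop row d c hstop)))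
          · exact Or.inr (Or.inr (Or.inr (by omega)))
        obtain ⟨L, Hlt, Hge⟩ := ih (c + aZeroRun row d c) (s.set c ((aZeroRun row d c : Nat) : Int))
          (by omega) (by simp [hs])
          H'
          (fun i h1 h2 => by
            rw [pv_getD_set_ne _ _ _ _ (by omega)]
            exact Hz i (by omega) h2)
        refine ⟨L, ?_, ?_⟩
        · intro i hi
          rw [Hlt i (by omega), pv_getD_set_ne _ _ _ _ (by omega)]
        · intro i h1 h2
          rcases Nat.eq_or_lt_of_le h1 with rfl | hlt
          · rw [Hlt c (by omega), pv_getD_set_self _ _ _ (by omega), if_pos ⟨h0, hedge⟩]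
          · by_cases hrun : i < c + aZeroRun row d c
            · have hz_i : row.getD i 0 = 0 := aZeroRun_zero_mem row d c i (by omega) hrun
              have hz_p : row.getD (i-1) 0 = 0 := aZeroRun_zero_mem row d c (i-1) (by omega) (by omega)
              rw [Hlt i hrun, pv_getD_set_ne _ _ _ _ (by omega), Hz i (by omega) h2,
                if_neg (by intro h; rcases h.2 with h' | h' <;> [omega; exact h' hz_p])]
            · exact Hge i (by omega) h2
      · rw [aOuterRow, dif_pos hc, if_neg h0]
        obtain ⟨L, Hlt, Hge⟩ := ih (c+1) s (by omega) hs
          (Or.inr (Or.inl (by simpa using h0)))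
          (fun i h1 h2 => Hz i (by omega) h2)
        refine ⟨L, fun i hi => Hlt i (by omega), ?_⟩
        intro i h1 h2
        rcases Nat.eq_or_lt_of_le h1 with rfl | hlt
        · rw [Hlt c (by omega), Hz c (by omega) h2, if_neg (by intro h; exact h0 h.1)]
        · exact Hge i (by omega) h2
    · rw [aOuterRow, dif_neg hc]
      exact ⟨hs, fun i _ => rfl, fun i h1 h2 => by omega⟩

theorem bLoop_char (row : List Int) (d : Nat) :
    ∀ c run out, c ≤ d → out.length = d →
    (c = 0 ∨ run = aZeroRun row d c ∨ ¬ row.getD (c-1) 0 = 0) →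
    (bLoop row c run out).length = d ∧
    (∀ i, c ≤ i → (bLoop row c run out).getD i 0 = out.getD i 0) ∧
    (∀ i, i < c → (bLoop row c run out).getD i 0 =
      (if row.getD i 0 = 0 ∧ (i = 0 ∨ ¬ row.getD (i-1) 0 = 0) then ((aZeroRun row d i : Nat) : Int) else out.getD i 0)) := by
  intro c
  induction c with
  | zero =>
    intro run out _ hout _
    exact ⟨hout, fun i _ => rfl, fun i hi => by omega⟩
  | succ c ih =>
    intro run out hcd hout H
    have hc : c < d := by omega
    by_cases h0 : row.getD c 0 = 0
    · have hrun : run = aZeroRun row d (c+1) := by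
        rcases H with h | h | h
        · omega
        · exact h
        · exact absurd h0 (by simpa using h)
      have hrc : ((run + 1 : Nat) : Int) = ((aZeroRun row d c : Nat) : Int) := by
        rw [aZeroRun_succ row d c hc h0, hrun]
      by_cases hedge : c = 0 ∨ ¬ row.getD (c-1) 0 = 0
      · have : bLoop row (c+1) run out = bLoop row c 0 (out.set c ((run + 1 : Nat) : Int)) := by
          simp only [bLoop, if_pos h0, if_pos hedge]
        rw [this]
        obtain ⟨L, Hge, Hlt⟩ := ih 0 (out.set c ((run + 1 : Nat) : Int)) (by omega) (by simp [hout])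
          (hedge.elim Or.inl (fun h => Or.inr (Or.inr h)))
        refine ⟨L, ?_, ?_⟩
        · intro i hi
          rw [Hge i (by omega), pv_getD_set_ne _ _ _ _ (by omega)]
        · intro i hi
          rcases Nat.lt_succ_iff_lt_or_eq.mp hi with hlt | heq
          · rw [Hlt i hlt]
            split
            · rfl
            · exact pv_getD_set_ne _ _ _ _ (by omega)
          · subst heq
            rw [Hge i le_rfl, pv_getD_set_self _ _ _ (by omega), if_pos ⟨h0, hedge⟩, hrc]
      · have : bLoop row (c+1) run out = bLoop row c (run + 1) out := by
          simp only [bLoop, if_pos h0, if_neg hedge]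
        rw [this]
        obtain ⟨L, Hge, Hlt⟩ := ih (run+1) out (by omega) hout
          (Or.inr (Or.inl (by rw [aZeroRun_succ row d c hc h0, hrun])))
        refine ⟨L, fun i hi => Hge i (by omega), ?_⟩
        intro i hi
        rcases Nat.lt_succ_iff_lt_or_eq.mp hi with hlt | heq
        · exact Hlt i hlt
        · subst heq
          rw [Hge i le_rfl, if_neg (fun h => hedge h.2)]
    · have : bLoop row (c+1) run out = bLoop row c 0 out := by
        simp only [bLoop, if_neg h0]
      rw [this]
      obtain ⟨L, Hge, Hlt⟩ := ih 0 out (by omega) hout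
        (Or.inr (Or.inl (aZeroRun_zero row d c (Or.inr h0)).symm))
      refine ⟨L, fun i hi => Hge i (by omega), ?_⟩
      intro i hi
      rcases Nat.lt_succ_iff_lt_or_eq.mp hi with hlt | heq
      · exact Hlt i hlt
      · subst heq
        rw [Hge i le_rfl, if_neg (fun h => h0 h.1)]

theorem row_eq (row : List Int) (d : Nat) :
    aOuterRow row d 0 (List.replicate d (0 : Int)) = bLoop row d 0 (List.replicate d (0 : Int)) := by
  obtain ⟨La, _, Ha⟩ := aOuter_char row d d 0 (List.replicate d (0 : Int)) (by omega)
    (by simp) (Or.inl rfl) (fun i _ _ => pv_getD_replicate d i)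
  obtain ⟨Lb, _, Hb⟩ := bLoop_char row d d 0 (List.replicate d (0 : Int)) le_rfl (by simp)
    (Or.inr (Or.inl (aZeroRun_zero row d d (Or.inl (lt_irrefl d))).symm))
  apply List.ext_getElem (by rw [La, Lb])
  intro i h1 h2
  have hi : i < d := by rwa [La] at h1
  rw [← List.getD_eq_getElem _ 0 h1, ← List.getD_eq_getElem _ 0 h2,
    Ha i (by omega) hi, Hb i hi, pv_getD_replicate]

-- ===== VERDICT (by name: the statement is the Claim_ definition above) =====
theorem compute_slack_py_spec : Claim_equal_compute_slack_py := by
  intro mask _ _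
  unfold Spec_compute_slack_py compute_slack_py compute_slack_py_alt
  simp only []
  exact List.map_congr_left (fun row _ => row_eq row (mask.headD []).length)
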